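-- pv_equiv track=rewrite | github.com/Ricvalp/score-based-inr-generation | dataset/nef_dataset/utils.py | splits_to_names
-- ===== SOURCE A (Python) =====
-- from typing import Any, Callable, List, Optional, Sequence, Tuple, Union
--
-- def splits_to_names(split_sizes: List[int]) -> List[str]:
--     start_idx = 0
--     split_names = []
--     for split_size in split_sizes:
--         end_idx = start_idx + split_size
--         split_names.append(f"{start_idx}_{end_idx}")
--         start_idx = end_idx
--     return split_names
-- ===== SOURCE B (Python) =====
-- def splits_to_names(split_sizes):
--     bounds = [0]
--     for s in split_sizes:
--         bounds.append(bounds[-1] + s)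
--     return [f"{a}_{b}" for a, b in zip(bounds, bounds[1:])]
-- ===== Notes on version B (the rewrite author's own statement) =====
-- stated objective: alternative
-- what changed: Replaces the single accumulator-threading loop (scalar running start index, appending each name inside the loop) with two passes: first materialize the full boundary table of prefix sums, then build the names by a pairwise zip of adjacent boundaries.
import Mathlib
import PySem

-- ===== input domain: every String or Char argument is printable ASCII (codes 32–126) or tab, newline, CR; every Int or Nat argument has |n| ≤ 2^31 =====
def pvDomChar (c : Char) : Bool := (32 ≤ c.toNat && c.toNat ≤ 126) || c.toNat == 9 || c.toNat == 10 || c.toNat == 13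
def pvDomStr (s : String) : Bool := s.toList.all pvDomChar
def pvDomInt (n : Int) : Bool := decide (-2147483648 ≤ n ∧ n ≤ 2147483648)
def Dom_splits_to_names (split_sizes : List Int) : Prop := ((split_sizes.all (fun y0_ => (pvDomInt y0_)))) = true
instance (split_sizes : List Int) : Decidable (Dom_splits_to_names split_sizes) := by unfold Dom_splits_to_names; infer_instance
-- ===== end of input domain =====

-- B builds the full boundary table of prefix sums first and then pairs adjacent boundaries,
-- instead of A's single loop threading a scalar running start index; alternative decomposition, same cost.

-- ===== PORT A =====
-- literal transliteration: one loop over split_sizes carrying (start_idx, split_names)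
def splits_to_names (split_sizes : List Int) : List String :=
  (split_sizes.foldl
    (fun (st : Int × List String) split_size =>
      let end_idx := st.1 + split_size
      (end_idx, st.2 ++ [PySem.Int.toStr st.1 ++ "_" ++ PySem.Int.toStr end_idx]))
    (0, [])).2

-- ===== PORT B =====
-- literal transliteration of Source B: build bounds = [0] extended by bounds[-1] + s, then zip adjacent pairs
def splits_to_names_alt (split_sizes : List Int) : List String :=
  let bounds := split_sizes.foldl (fun bs s => bs ++ [bs.getLast! + s]) [0]
  (bounds.zip bounds.tail).map (fun p => PySem.Int.toStr p.1 ++ "_" ++ PySem.Int.toStr p.2)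

-- ===== PRECONDITION & SPEC =====
def Spec_splits_to_names (split_sizes : List Int) (out : List String) : Prop := out = splits_to_names_alt split_sizes
instance (split_sizes : List Int) (out : List String) : Decidable (Spec_splits_to_names split_sizes out) := by unfold Spec_splits_to_names; infer_instance

-- ===== CLAIM (what is proved, stated in full; the proofs are below) =====
def Claim_equal_splits_to_names : Prop := ∀ (split_sizes : List Int), Dom_splits_to_names split_sizes → Spec_splits_to_names split_sizes (splits_to_names split_sizes)

-- ===== LEMMAS AND PROOFS =====

-- reference form: the names starting at s
def pvNames (s : Int) : List Int → List String
  | [] => []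
  | x :: xs => (PySem.Int.toStr s ++ "_" ++ PySem.Int.toStr (s + x)) :: pvNames (s + x) xs

-- prefix-sum scan starting at s
def pvScan (s : Int) : List Int → List Int
  | [] => [s]
  | x :: xs => s :: pvScan (s + x) xs

lemma pvA_eq (xs : List Int) : ∀ (s : Int) (acc : List String),
    (xs.foldl
      (fun (st : Int × List String) split_size =>
        let end_idx := st.1 + split_size
        (end_idx, st.2 ++ [PySem.Int.toStr st.1 ++ "_" ++ PySem.Int.toStr end_idx]))
      (s, acc)).2 = acc ++ pvNames s xs := by
  induction xs with
  | nil => intro s acc; simp [pvNames]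
  | cons x xs ih =>
    intro s acc
    simp only [List.foldl_cons, pvNames]
    rw [ih]
    simp

lemma pvB_bounds (xs : List Int) : ∀ (pre : List Int) (s : Int),
    (xs.foldl (fun bs s => bs ++ [bs.getLast! + s]) (pre ++ [s])) = pre ++ pvScan s xs := by
  induction xs with
  | nil => intro pre s; simp [pvScan]
  | cons x xs ih =>
    intro pre s
    simp only [List.foldl_cons]
    have h : (pre ++ [s]).getLast! = s := by simp
    rw [h, ih (pre ++ [s]) (s + x)]
    simp [pvScan]

lemma pvB_zip (xs : List Int) : ∀ (s : Int),
    ((pvScan s xs).zip (pvScan s xs).tail).map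
      (fun p => PySem.Int.toStr p.1 ++ "_" ++ PySem.Int.toStr p.2) = pvNames s xs := by
  induction xs with
  | nil => intro s; simp [pvScan, pvNames]
  | cons x xs ih =>
    intro s
    have hs : pvScan (s + x) xs = (s + x) :: (pvScan (s + x) xs).tail := by
      cases xs <;> simp [pvScan]
    simp only [pvScan, List.tail_cons]
    conv_lhs => rw [hs]
    simp only [List.zip_cons_cons, List.map_cons]
    rw [← hs, ih]
    rfl

-- ===== VERDICT (by name: the statement is the Claim_ definition above) =====
theorem splits_to_names_spec : Claim_equal_splits_to_names := by
  intro xs _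
  unfold Spec_splits_to_names splits_to_names splits_to_names_alt
  rw [pvA_eq xs 0 []]
  have hb := pvB_bounds xs [] 0
  simp only [List.nil_append] at hb
  rw [hb, pvB_zip xs 0]
  simp
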